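-- pv_equiv track=rewrite | github.com/chinnichaitanya/spellwise | spell_checker/algorithms/editex.py | _letters_in_group
-- ===== SOURCE A (Python) =====
-- def _letters_in_group(a, b):
--     values = [0, 0]
--     letters = [a, b]
--     for i in [0, 1]:
--         if letters[i] in ["a", "e", "i", "o", "u", "y"]:
--             values[i] += pow(2, 9)
--         if letters[i] in ["b", "p"]:
--             values[i] += pow(2, 8)
--         if letters[i] in ["c", "k", "q"]:
--             values[i] += pow(2, 7)
--         if letters[i] in ["d", "t"]:
--             values[i] += pow(2, 6)
--         if letters[i] in ["l", "r"]:
--             values[i] += pow(2, 5)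
--         if letters[i] in ["m", "n"]:
--             values[i] += pow(2, 4)
--         if letters[i] in ["g", "j"]:
--             values[i] += pow(2, 3)
--         if letters[i] in ["f", "p", "v"]:
--             values[i] += pow(2, 2)
--         if letters[i] in ["x", "s", "z"]:
--             values[i] += pow(2, 1)
--         if letters[i] in ["c", "s", "z"]:
--             values[i] += pow(2, 0)
--     if (values[0] & values[1]) > 0:
--         return True
--     else:
--         return False
-- ===== SOURCE B (Python) =====
-- _GROUPS = [
--     ["a", "e", "i", "o", "u", "y"],
--     ["b", "p"],
--     ["c", "k", "q"],
--     ["d", "t"],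
--     ["l", "r"],
--     ["m", "n"],
--     ["g", "j"],
--     ["f", "p", "v"],
--     ["x", "s", "z"],
--     ["c", "s", "z"],
-- ]
--
--
-- def _letters_in_group(a, b):
--     return any(a in g and b in g for g in _GROUPS)
-- ===== Notes on version B (the rewrite author's own statement) =====
-- stated objective: simpler
-- what changed: Replaces the per-letter bitmask accumulation and bitwise AND with a single scan over a list of phonetic groups testing joint membership.
import Mathlib
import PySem

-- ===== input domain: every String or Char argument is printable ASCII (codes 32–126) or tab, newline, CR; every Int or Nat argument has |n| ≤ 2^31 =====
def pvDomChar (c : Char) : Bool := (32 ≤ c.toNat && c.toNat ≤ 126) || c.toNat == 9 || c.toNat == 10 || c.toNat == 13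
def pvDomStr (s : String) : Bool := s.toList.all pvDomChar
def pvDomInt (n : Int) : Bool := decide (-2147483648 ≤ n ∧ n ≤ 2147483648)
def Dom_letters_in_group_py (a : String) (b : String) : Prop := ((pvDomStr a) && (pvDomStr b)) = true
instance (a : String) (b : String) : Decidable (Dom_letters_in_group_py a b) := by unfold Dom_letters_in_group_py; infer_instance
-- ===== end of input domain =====

-- B replaces A's bitmask accumulation and bitwise AND by one scan over a list of
-- phonetic groups testing joint membership (objective: simpler).

-- ===== PORT A =====
-- the per-letter bitmask of A's loop body (the ten 'if … in …: values[i] += 2^k' steps)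
def pvGroupValue (letter : String) : Int :=
  let v : Int := 0
  let v := if (["a", "e", "i", "o", "u", "y"] : List String).contains letter then v + 2 ^ 9 else v
  let v := if (["b", "p"] : List String).contains letter then v + 2 ^ 8 else v
  let v := if (["c", "k", "q"] : List String).contains letter then v + 2 ^ 7 else v
  let v := if (["d", "t"] : List String).contains letter then v + 2 ^ 6 else v
  let v := if (["l", "r"] : List String).contains letter then v + 2 ^ 5 else v
  let v := if (["m", "n"] : List String).contains letter then v + 2 ^ 4 else v
  let v := if (["g", "j"] : List String).contains letter then v + 2 ^ 3 else v
  let v := if (["f", "p", "v"] : List String).contains letter then v + 2 ^ 2 else v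
  let v := if (["x", "s", "z"] : List String).contains letter then v + 2 ^ 1 else v
  let v := if (["c", "s", "z"] : List String).contains letter then v + 2 ^ 0 else v
  v

def letters_in_group_py (a : String) (b : String) : Bool :=
  let letters := [a, b]
  let values := letters.map pvGroupValue
  if (values[0]!.land values[1]!) > 0 then true else false

-- ===== PORT B =====
def pvGroups : List (List String) :=
  [["a", "e", "i", "o", "u", "y"],
   ["b", "p"],
   ["c", "k", "q"],
   ["d", "t"],
   ["l", "r"],
   ["m", "n"],
   ["g", "j"],
   ["f", "p", "v"],
   ["x", "s", "z"],
   ["c", "s", "z"]]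

def letters_in_group_py_alt (a : String) (b : String) : Bool :=
  pvGroups.any (fun g => g.contains a && g.contains b)

-- ===== PRECONDITION & SPEC =====
def Spec_letters_in_group_py (a : String) (b : String) (out : Bool) : Prop := out = letters_in_group_py_alt a b
instance (a : String) (b : String) (out : Bool) : Decidable (Spec_letters_in_group_py a b out) := by unfold Spec_letters_in_group_py; infer_instance

-- ===== CLAIM (what is proved, stated in full; the proofs are below) =====
def Claim_equal_letters_in_group_py : Prop := ∀ (a : String) (b : String), Dom_letters_in_group_py a b → Spec_letters_in_group_py a b (letters_in_group_py a b)

-- ===== LEMMAS AND PROOFS =====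

-- the union of all letters appearing in any group
def pvAllLetters : List String :=
  ["a", "e", "i", "o", "u", "y", "b", "p", "c", "k", "q", "d", "t",
   "l", "r", "m", "n", "g", "j", "f", "v", "x", "s", "z"]

theorem pvGroupValue_eq_zero (x : String) (h : x ∉ pvAllLetters) : pvGroupValue x = 0 := by
  simp [pvAllLetters, List.mem_cons] at h
  obtain ⟨h1, h2, h3, h4, h5, h6, h7, h8, h9, h10, h11, h12, h13,
    h14, h15, h16, h17, h18, h19, h20, h21, h22, h23, h24⟩ := h
  simp [pvGroupValue, List.contains_eq_mem, List.mem_cons,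
    h1, h2, h3, h4, h5, h6, h7, h8, h9, h10, h11, h12, h13,
    h14, h15, h16, h17, h18, h19, h20, h21, h22, h23, h24]

theorem pvAlt_false_left (a b : String) (h : a ∉ pvAllLetters) :
    letters_in_group_py_alt a b = false := by
  simp [pvAllLetters, List.mem_cons] at h
  obtain ⟨h1, h2, h3, h4, h5, h6, h7, h8, h9, h10, h11, h12, h13,
    h14, h15, h16, h17, h18, h19, h20, h21, h22, h23, h24⟩ := h
  simp [letters_in_group_py_alt, pvGroups, List.contains_eq_mem, List.mem_cons,
    h1, h2, h3, h4, h5, h6, h7, h8, h9, h10, h11, h12, h13,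
    h14, h15, h16, h17, h18, h19, h20, h21, h22, h23, h24]

theorem pvAlt_false_right (a b : String) (h : b ∉ pvAllLetters) :
    letters_in_group_py_alt a b = false := by
  simp [pvAllLetters, List.mem_cons] at h
  obtain ⟨h1, h2, h3, h4, h5, h6, h7, h8, h9, h10, h11, h12, h13,
    h14, h15, h16, h17, h18, h19, h20, h21, h22, h23, h24⟩ := h
  simp [letters_in_group_py_alt, pvGroups, List.contains_eq_mem, List.mem_cons,
    h1, h2, h3, h4, h5, h6, h7, h8, h9, h10, h11, h12, h13,
    h14, h15, h16, h17, h18, h19, h20, h21, h22, h23, h24]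

theorem pv_land_zero (x : Int) : Int.land x 0 = 0 := by
  cases x <;> simp [Int.land, Nat.ldiff]

theorem pv_zero_land (x : Int) : Int.land 0 x = 0 := by
  cases x <;> simp [Int.land, Nat.ldiff]

theorem pvA_eq_land (a b : String) :
    letters_in_group_py a b =
      (if ((pvGroupValue a).land (pvGroupValue b)) > 0 then true else false) := by
  rfl

-- ===== VERDICT (by name: the statement is the Claim_ definition above) =====
theorem letters_in_group_py_spec : Claim_equal_letters_in_group_py := by
  intro a b _
  unfold Spec_letters_in_group_py
  by_cases ha : a ∈ pvAllLetters
  · by_cases hb : b ∈ pvAllLetters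
    · fin_cases ha <;> fin_cases hb <;> decide
    · rw [pvA_eq_land, pvGroupValue_eq_zero b hb, pvAlt_false_right a b hb]
      rw [pv_land_zero]; decide
  · rw [pvA_eq_land, pvGroupValue_eq_zero a ha, pvAlt_false_left a b ha]
    rw [pv_zero_land]; decide
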